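-- pv_equiv track=rewrite | github.com/johsam/timebox-evo-rest | evo/encoder.py | encode_colours
-- ===== SOURCE A (Python) =====
-- import math
-- from typing import List
-- from collections import OrderedDict
--
-- def encode_colours(colour_array: List[int]) -> str:
--     colour_dict = OrderedDict()  # type: OrderedDict[int,int]
--     colour_order = []
--     for colour in colour_array:
--         if colour not in colour_dict:
--             colour_dict[colour] = len(colour_dict)
--         colour_order.append(colour_dict[colour])
--
--     bits_needed = int(math.ceil(math.log(len(colour_dict), 2)))
--     if bits_needed == 0:
--         bits_needed = 1
--     img_data = '{0:02x}'.format(len(colour_dict) % 256)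
--     for colour in colour_dict:
--         img_data += '{0:06x}'.format(colour)
--
--     c_data = ''
--     for i in colour_order:
--         c_data += '{0:08b}'.format(i)[-1::-1][:bits_needed]
--     for i in range(-1, len(c_data) - 1, 8):
--         if i == -1:
--             img_data += '{0:02x}'.format(int(c_data[i + 8::-1], 2))
--             continue
--         img_data += '{0:02x}'.format(int(c_data[i + 8:i:-1], 2))
--     return img_data
-- ===== SOURCE B (Python) =====
-- import math
--
--
-- def encode_colours(colour_array):
--     # palette: colour -> index of first occurrence; index stream in one comprehension
--     palette = {}
--     indices = [palette.setdefault(c, len(palette)) for c in colour_array]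
--     n = len(palette)
--     bits_needed = int(math.ceil(math.log(n, 2))) or 1
--     parts = ['{0:02x}'.format(n % 256)]
--     parts += ['{0:06x}'.format(c) for c in palette]
--     # pack each index's low bits_needed bits LSB-first into a running accumulator,
--     # emitting a hex byte whenever 8 bits are buffered, flushing the partial byte
--     acc = 0
--     nb = 0
--     for i in indices:
--         acc += (i & ((1 << bits_needed) - 1)) << nb
--         nb += bits_needed
--         while nb >= 8:
--             parts.append('{0:02x}'.format(acc & 0xff))
--             acc >>= 8
--             nb -= 8
--     if nb:
--         parts.append('{0:02x}'.format(acc))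
--     return ''.join(parts)
-- ===== Notes on version B (the rewrite author's own statement) =====
-- stated objective: alternative
-- what changed: The palette pass becomes a dict.setdefault comprehension and the two-step 'build a full binary bit-string, then re-slice it into reversed 8-char chunks' is replaced by a single integer bit-accumulator pass that pushes each index's low bits_needed bits LSB-first and emits a hex byte whenever 8 bits are buffered, flushing the final partial byte; …
-- outside the precondition, e.g. on encode_colours([]): A raises ValueError, B raises ValueError
import Mathlib
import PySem

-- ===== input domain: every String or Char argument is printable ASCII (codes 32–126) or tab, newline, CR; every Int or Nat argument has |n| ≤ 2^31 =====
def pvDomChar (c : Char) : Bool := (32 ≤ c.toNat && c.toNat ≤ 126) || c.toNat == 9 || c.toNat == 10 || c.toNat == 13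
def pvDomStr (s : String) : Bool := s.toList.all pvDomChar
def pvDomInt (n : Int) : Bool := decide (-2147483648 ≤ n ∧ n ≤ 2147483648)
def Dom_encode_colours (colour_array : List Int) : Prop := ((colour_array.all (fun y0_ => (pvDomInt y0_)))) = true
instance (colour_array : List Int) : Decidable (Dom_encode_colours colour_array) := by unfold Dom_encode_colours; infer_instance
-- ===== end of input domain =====

-- B replaces A's 'binary string built then re-sliced into reversed bytes' by a single integer
-- bit-accumulator pass (alternative decomposition, same cost); return-value equivalence only.

-- ===== shared formatting helpers (Python format semantics, used by both ports) =====

-- '{0:b}'.format(n): minimal binary digits, MSB first; format(0,'b') = "0"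
def binDigits (n : Nat) : List Char :=
  if h : n < 2 then [Nat.digitChar n] else binDigits (n / 2) ++ [Nat.digitChar (n % 2)]
decreasing_by exact Nat.div_lt_self (by omega) (by omega)

-- '{0:x}'.format(n) for n ≥ 0: minimal lowercase hex digits, MSB first
def hexDigits (n : Nat) : List Char :=
  if h : n < 16 then [Nat.digitChar n] else hexDigits (n / 16) ++ [Nat.digitChar (n % 16)]
decreasing_by exact Nat.div_lt_self (by omega) (by omega)

-- zero-padding to width w (str.zfill)
def zfill (w : Nat) (ds : List Char) : List Char := List.replicate (w - ds.length) '0' ++ ds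

-- '{0:0wx}'.format(n) for an int n: the sign counts towards the total width w
def fmtHex (w : Nat) (n : Int) : List Char :=
  if n < 0 then '-' :: zfill (w - 1) (hexDigits n.natAbs) else zfill w (hexDigits n.natAbs)

-- int(math.ceil(math.log(n, 2))): exact for all palette sizes 1 ≤ n ≤ 256 that Pre_ admits
-- (the first float divergence of math.log(n, 2) is far above); n = 0 raises ValueError in Python
def pyCeilLog2 (n : Nat) : Nat := if n ≤ 1 then 0 else Nat.log2 (n - 1) + 1

-- int(s, 2): exact for the nonempty strings of '0'/'1' it is applied to here
def parseBin (cs : List Char) : Nat := cs.foldl (fun a c => 2 * a + (if c = '1' then 1 else 0)) 0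

-- ===== PORT A =====
-- Python str concatenation is ported on List Char (exact; String.ofList at the end)
def encode_colours (colour_array : List Int) : String :=
  let p := colour_array.foldl
    (fun (p : PySem.Dict Int Nat × List Nat) colour =>
      let d := if p.1.contains colour then p.1 else p.1.insert colour p.1.size
      -- colour_dict[colour]: the key is always present here, KeyError impossible
      (d, p.2 ++ [d.getD colour 0]))
    (PySem.Dict.empty, [])
  let colour_dict := p.1
  let colour_order := p.2
  let b0 := pyCeilLog2 colour_dict.size
  let bits_needed := if b0 = 0 then 1 else b0
  let img0 := fmtHex 2 ((colour_dict.size % 256 : Nat) : Int)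
  let img1 := colour_dict.keys.foldl (fun s colour => s ++ fmtHex 6 colour) img0
  -- '{0:08b}'.format(i)[-1::-1][:bits_needed]: s[-1::-1] is the reversal, [:w] is take
  let c_data := colour_order.foldl
    (fun s i => s ++ ((zfill 8 (binDigits i)).reverse.take bits_needed)) []
  let img2 := (PySem.List.pyRange (-1) ((c_data.length : Int) - 1) 8).foldl
    (fun s i =>
      if i = -1 then
        -- c_data[i+8::-1] at i = -1: items 7,6,…,0, start clamped to len-1 = (take 8).reverse (exact)
        s ++ fmtHex 2 ((parseBin ((c_data.take 8).reverse) : Nat) : Int)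
      else
        -- c_data[i+8:i:-1] for the loop's i ≥ 7: items i+8,…,i+1, start clamped to len-1
        --   = ((drop (i+1)).take 8).reverse (exact for every i ≥ 0)
        s ++ fmtHex 2 ((parseBin (((c_data.drop (i + 1).toNat).take 8).reverse) : Nat) : Int))
    img1
  String.ofList img2

-- ===== PORT B =====
-- the 'while nb >= 8: emit a byte' inner loop
def emitBytes (acc nb : Nat) (parts : List (List Char)) : Nat × Nat × List (List Char) :=
  if 8 ≤ nb then emitBytes (acc / 256) (nb - 8) (parts ++ [fmtHex 2 ((acc % 256 : Nat) : Int)])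
  else (acc, nb, parts)

def encode_colours_alt (colour_array : List Int) : String :=
  let p := colour_array.foldl
    (fun (p : PySem.Dict Int Nat × List Nat) c =>
      -- palette.setdefault(c, len(palette)): inserts if absent, returns the mapped value
      (p.1.setdefault c p.1.size, p.2 ++ [(p.1.get? c).getD p.1.size]))
    (PySem.Dict.empty, [])
  let n := p.1.size
  let b0 := pyCeilLog2 n
  let bits_needed := if b0 = 0 then 1 else b0
  let parts0 := fmtHex 2 ((n % 256 : Nat) : Int) :: p.1.keys.map (fun c => fmtHex 6 c)
  let st := p.2.foldl
    (fun (s : Nat × Nat × List (List Char)) i =>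
      -- acc += (i & ((1 << bits_needed) - 1)) << nb ; nb += bits_needed ; while nb >= 8: emit
      emitBytes (s.1 + (i % 2 ^ bits_needed) * 2 ^ s.2.1) (s.2.1 + bits_needed) s.2.2)
    (0, 0, parts0)
  let parts1 := if st.2.1 ≠ 0 then st.2.2 ++ [fmtHex 2 ((st.1 : Nat) : Int)] else st.2.2
  String.ofList parts1.flatten

-- ===== PRECONDITION & SPEC =====
-- Pre_ excludes the empty list, on which A (and B) raises ValueError (math.log(0, 2)), and
-- arrays with more than 256 distinct colours, outside the format's natural domain: the
-- one-byte palette-count header is len(palette) % 256, and A there truncates indices wider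
-- than their 8-padded binary rendering while B emits full bits_needed-bit indices.
def Pre_encode_colours (colour_array : List Int) : Prop :=
  colour_array ≠ [] ∧ (PySem.List.dedup colour_array).length ≤ 256
instance (colour_array : List Int) : Decidable (Pre_encode_colours colour_array) := by
  unfold Pre_encode_colours; infer_instance

def pvWitness_encode_colours : List Int := [16711680, 255, 16711680, 0]

def Spec_encode_colours (colour_array : List Int) (out : String) : Prop :=
  out = encode_colours_alt colour_array
instance (colour_array : List Int) (out : String) : Decidable (Spec_encode_colours colour_array out) := by
  unfold Spec_encode_colours; infer_instance

-- ===== CLAIM (what is proved, stated in full; the proofs are below) =====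
def Claim_equal_encode_colours : Prop := ∀ (colour_array : List Int), Dom_encode_colours colour_array → Pre_encode_colours colour_array → Spec_encode_colours colour_array (encode_colours colour_array)

-- ===== LEMMAS AND PROOFS =====

-- ----- proof-side bit machinery -----

-- i.bit_length() (proof-side only)
def bitLen (n : Nat) : Nat := if n = 0 then 0 else Nat.log2 n + 1

-- the low k bits of i, LSB first
def natBits : Nat → Nat → List Bool
  | 0, _ => []
  | k + 1, i => (decide (i % 2 = 1)) :: natBits k (i / 2)

def bitChar (b : Bool) : Char := if b then '1' else '0'

-- value of an LSB-first bit list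
def valLSB : List Bool → Nat
  | [] => 0
  | b :: bs => (if b then 1 else 0) + 2 * valLSB bs

-- the complete 8-bit bytes of a bit stream, and its remainder
def full8 (L : List Bool) : List Nat :=
  if 8 <= L.length then valLSB (L.take 8) :: full8 (L.drop 8) else []
termination_by L.length
decreasing_by simp; omega

def rem8 (L : List Bool) : List Bool :=
  if 8 <= L.length then rem8 (L.drop 8) else L
termination_by L.length
decreasing_by simp; omega

-- all bytes, the partial last one included (A's byte loop)
def packA (L : List Bool) : List Nat :=
  if L.isEmpty then [] else valLSB (L.take 8) :: packA (L.drop 8)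
termination_by L.length
decreasing_by rename_i h; simp [List.isEmpty_iff, ← List.length_eq_zero_iff] at h; simp; omega

theorem length_natBits (k i : Nat) : (natBits k i).length = k := by
  induction k generalizing i with
  | zero => rfl
  | succ k ih => simp [natBits, ih]

theorem valLSB_lt (bs : List Bool) : valLSB bs < 2 ^ bs.length := by
  induction bs with
  | nil => simp [valLSB]
  | cons b bs ih => simp [valLSB, pow_succ]; cases b <;> simp <;> omega

theorem valLSB_append (xs ys : List Bool) :
    valLSB (xs ++ ys) = valLSB xs + 2 ^ xs.length * valLSB ys := by
  induction xs with
  | nil => simp [valLSB]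
  | cons x xs ih => simp [valLSB, ih, pow_succ]; ring

theorem valLSB_natBits (k i : Nat) : valLSB (natBits k i) = i % 2 ^ k := by
  induction k generalizing i with
  | zero => simp [natBits, valLSB, Nat.mod_one]
  | succ k ih =>
    simp only [natBits, valLSB, ih]
    have h3 : 2 * (i / 2) + i % 2 = i := Nat.div_add_mod i 2
    have h2 : 2 ^ k * (i / 2 / 2 ^ k) + (i / 2) % 2 ^ k = i / 2 := Nat.div_add_mod _ _
    have hkey : (i % 2 + 2 * ((i / 2) % 2 ^ k)) + (2 ^ k * 2) * (i / 2 / 2 ^ k) = i := by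
      conv_rhs => rw [← h3, ← h2]
      ring
    have hlt' : i % 2 + 2 * ((i / 2) % 2 ^ k) < 2 ^ k * 2 := by
      have := Nat.mod_lt (i / 2) (show 0 < 2 ^ k by positivity)
      have := Nat.mod_lt i (show 0 < 2 by omega)
      omega
    have hmod : i % 2 ^ (k + 1) = i % 2 + 2 * (i / 2 % 2 ^ k) := by
      conv_lhs => rw [pow_succ, ← hkey]
      rw [Nat.add_mul_mod_self_left, Nat.mod_eq_of_lt hlt']
    rw [hmod]
    rcases Nat.mod_two_eq_zero_or_one i with h | h <;> simp [h]

theorem natBits_take (k m i : Nat) : (natBits m i).take k = natBits (min k m) i := by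
  induction m generalizing k i with
  | zero => simp [natBits]
  | succ m ih =>
    cases k with
    | zero => simp [natBits]
    | succ k => simp [natBits, ih, Nat.succ_min_succ]

theorem natBits_add (m j i : Nat) :
    natBits (m + j) i = natBits m i ++ natBits j (i / 2 ^ m) := by
  induction m generalizing i with
  | zero => simp [natBits]
  | succ m ih =>
    rw [show m + 1 + j = (m + j) + 1 from by omega]
    simp only [natBits, ih, pow_succ, ← Nat.div_div_eq_div_mul]
    simp only [List.cons_append, List.cons.injEq, true_and]
    congr 1
    rw [Nat.div_div_eq_div_mul, Nat.div_div_eq_div_mul, Nat.mul_comm]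

theorem natBits_zero_bits (j : Nat) : natBits j 0 = List.replicate j false := by
  induction j with
  | zero => rfl
  | succ j ih => simp [natBits, ih, List.replicate_succ]

theorem bitLen_le_iff (i m : Nat) : bitLen i ≤ m ↔ i < 2 ^ m := by
  unfold bitLen
  split
  · rename_i h
    subst h
    have := Nat.two_pow_pos m
    constructor <;> intro <;> omega
  · rename_i h
    rw [Nat.succ_le_iff, Nat.log2_lt h]

theorem bitChar_mod2 (n : Nat) : Nat.digitChar (n % 2) = bitChar (decide (n % 2 = 1)) := by
  rcases Nat.mod_two_eq_zero_or_one n with h | h <;> simp [h, bitChar] <;> rfl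

theorem bitLen_div2 (n : Nat) (h : 2 ≤ n) : bitLen n = bitLen (n / 2) + 1 := by
  unfold bitLen
  have h2 : n / 2 ≠ 0 := by omega
  rw [if_neg (by omega), if_neg h2, Nat.log2_def, if_pos h]

theorem binDigits_reverse (i : Nat) :
    (binDigits i).reverse = (natBits (max 1 (bitLen i)) i).map bitChar := by
  induction i using binDigits.induct with
  | case1 n h =>
    rw [binDigits, dif_pos h]
    interval_cases n <;> decide
  | case2 n h ih =>
    have h2 : 2 ≤ n := by omega
    rw [binDigits, dif_neg h]
    rw [List.reverse_append, List.reverse_singleton, List.singleton_append, ih]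
    have hd2 : n / 2 ≠ 0 := by omega
    have hb : 1 ≤ bitLen (n / 2) := by unfold bitLen; rw [if_neg hd2]; omega
    have hbn : max 1 (bitLen n) = max 1 (bitLen (n / 2)) + 1 := by
      rw [bitLen_div2 n h2]; omega
    rw [hbn]
    have : natBits (max 1 (bitLen (n / 2)) + 1) n
        = (decide (n % 2 = 1)) :: natBits (max 1 (bitLen (n / 2))) (n / 2) := rfl
    rw [this, List.map_cons, ← bitChar_mod2]

theorem length_binDigits (i : Nat) : (binDigits i).length = max 1 (bitLen i) := by
  rw [← List.length_reverse, binDigits_reverse, List.length_map, length_natBits]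

-- the chunk one index contributes: under Pre_ the width w is at most 8, so A's
-- '{0:08b}'.format(i) reversed and cut to w chars is exactly the low w bits of i
theorem chunkChars (w i : Nat) (hw : w ≤ 8) :
    ((zfill 8 (binDigits i)).reverse).take w = (natBits w i).map bitChar := by
  unfold zfill
  rw [List.reverse_append, List.reverse_replicate, binDigits_reverse, length_binDigits]
  have h0 : bitChar false = '0' := rfl
  rw [show (List.replicate (8 - max 1 (bitLen i)) '0')
        = (List.replicate (8 - max 1 (bitLen i)) false).map bitChar from by
      rw [List.map_replicate, h0]]
  rw [← List.map_append, ← List.map_take]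
  congr 1
  have hb : bitLen i ≤ max 1 (bitLen i) := le_max_right _ _
  have hdiv : i / 2 ^ (max 1 (bitLen i)) = 0 :=
    Nat.div_eq_of_lt ((bitLen_le_iff _ _).mp hb)
  have hadd := natBits_add (max 1 (bitLen i)) (8 - max 1 (bitLen i)) i
  rw [hdiv, natBits_zero_bits] at hadd
  rw [← hadd, natBits_take]
  congr 1
  omega

theorem parseBin_append_bit (cs : List Char) (c : Char) :
    parseBin (cs ++ [c]) = 2 * parseBin cs + (if c = '1' then 1 else 0) := by
  simp [parseBin, List.foldl_append]

theorem parseBin_reverse (l : List Bool) :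
    parseBin ((l.map bitChar).reverse) = valLSB l := by
  induction l with
  | nil => rfl
  | cons b bs ih =>
    rw [List.map_cons, List.reverse_cons, parseBin_append_bit, ih]
    cases b <;> simp [bitChar, valLSB] <;> omega

theorem rem8_length_lt (L : List Bool) : (rem8 L).length < 8 := by
  induction L using rem8.induct with
  | case1 L h ih => rw [rem8, if_pos h]; exact ih
  | case2 L h => rw [rem8, if_neg h]; omega

theorem full8_append (bs rest : List Bool) :
    full8 (bs ++ rest) = full8 bs ++ full8 (rem8 bs ++ rest) := by
  induction bs using full8.induct with
  | case1 bs h ih =>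
    have hlen : 8 ≤ (bs ++ rest).length := by simp; omega
    rw [full8, if_pos hlen, List.take_append_of_le_length h,
        List.drop_append_of_le_length h, ih]
    rw [show full8 bs = valLSB (bs.take 8) :: full8 (bs.drop 8) from by rw [full8, if_pos h]]
    rw [show rem8 bs = rem8 (bs.drop 8) from by rw [rem8, if_pos h]]
    simp
  | case2 bs h =>
    rw [show full8 bs = [] from by rw [full8, if_neg h]]
    rw [show rem8 bs = bs from by rw [rem8, if_neg h]]
    simp

theorem rem8_append (bs rest : List Bool) :
    rem8 (bs ++ rest) = rem8 (rem8 bs ++ rest) := by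
  induction bs using rem8.induct with
  | case1 bs h ih =>
    have hlen : 8 ≤ (bs ++ rest).length := by simp; omega
    rw [show rem8 (bs ++ rest) = rem8 ((bs ++ rest).drop 8) from by rw [rem8, if_pos hlen]]
    rw [List.drop_append_of_le_length h, ih]
    rw [show rem8 bs = rem8 (bs.drop 8) from by rw [rem8, if_pos h]]
  | case2 bs h =>
    rw [show rem8 bs = bs from by rw [rem8, if_neg h]]

theorem packA_eq (L : List Bool) :
    packA L = full8 L ++ (if rem8 L = [] then [] else [valLSB (rem8 L)]) := by
  induction L using full8.induct with
  | case1 L h ih =>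
    have hne : ¬ L.isEmpty := by
      cases L with
      | nil => simp at h
      | cons a l => simp
    rw [packA, if_neg hne, ih]
    rw [show full8 L = valLSB (L.take 8) :: full8 (L.drop 8) from by rw [full8, if_pos h]]
    rw [show rem8 L = rem8 (L.drop 8) from by rw [rem8, if_pos h]]
    simp
  | case2 L h =>
    rw [show full8 L = ([] : List Nat) from by rw [full8, if_neg h]]
    rw [show rem8 L = L from by rw [rem8, if_neg h]]
    cases L with
    | nil => rw [packA]; simp
    | cons a l =>
      rw [packA, if_neg (by simp)]
      rw [show packA ((a :: l).drop 8) = [] from by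
        rw [List.drop_eq_nil_of_le (by omega), packA]; rfl]
      rw [List.take_of_length_le (by omega)]
      simp

theorem emit_spec (bs : List Bool) (parts : List (List Char)) :
    emitBytes (valLSB bs) bs.length parts
      = (valLSB (rem8 bs), (rem8 bs).length,
         parts ++ (full8 bs).map (fun b => fmtHex 2 ((b : Nat) : Int))) := by
  induction bs using full8.induct generalizing parts with
  | case1 bs h ih =>
    have hsplit : valLSB bs = valLSB (bs.take 8) + 256 * valLSB (bs.drop 8) := by
      conv_lhs => rw [← List.take_append_drop 8 bs]
      rw [valLSB_append, List.length_take, Nat.min_eq_left h]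
      norm_num
    have hlt : valLSB (bs.take 8) < 256 := by
      have := valLSB_lt (bs.take 8)
      have hl : (bs.take 8).length = 8 := by rw [List.length_take, Nat.min_eq_left h]
      rw [hl] at this
      omega
    rw [emitBytes, if_pos h]
    have hdiv : valLSB bs / 256 = valLSB (bs.drop 8) := by omega
    have hmod : valLSB bs % 256 = valLSB (bs.take 8) := by omega
    have hlen : bs.length - 8 = (bs.drop 8).length := by simp
    rw [hdiv, hmod, hlen, ih]
    rw [show full8 bs = valLSB (bs.take 8) :: full8 (bs.drop 8) from by rw [full8, if_pos h]]
    rw [show rem8 bs = rem8 (bs.drop 8) from by rw [rem8, if_pos h]]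
    simp
  | case2 bs h =>
    rw [emitBytes, if_neg h]
    rw [show full8 bs = ([] : List Nat) from by rw [full8, if_neg h]]
    rw [show rem8 bs = bs from by rw [rem8, if_neg h]]
    simp

theorem foldB_spec (w : Nat) (I : List Nat) (r : List Bool) (parts : List (List Char))
    (hr : r.length < 8) :
    I.foldl (fun (s : Nat × Nat × List (List Char)) i =>
        emitBytes (s.1 + (i % 2 ^ w) * 2 ^ s.2.1) (s.2.1 + w) s.2.2)
      (valLSB r, r.length, parts)
    = (valLSB (rem8 (r ++ I.flatMap (natBits w))),
       (rem8 (r ++ I.flatMap (natBits w))).length,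
       parts ++ (full8 (r ++ I.flatMap (natBits w))).map (fun b => fmtHex 2 ((b : Nat) : Int))) := by
  induction I generalizing r parts with
  | nil =>
    rw [List.foldl_nil, List.flatMap_nil, List.append_nil]
    rw [show rem8 r = r from by rw [rem8, if_neg (by omega)]]
    rw [show full8 r = ([] : List Nat) from by rw [full8, if_neg (by omega)]]
    simp
  | cons i I' ih =>
    have hstep : emitBytes (valLSB r + i % 2 ^ w * 2 ^ r.length) (r.length + w) parts
        = (valLSB (rem8 (r ++ natBits w i)), (rem8 (r ++ natBits w i)).length,
           parts ++ (full8 (r ++ natBits w i)).map (fun b => fmtHex 2 ((b : Nat) : Int))) := by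
      rw [show valLSB r + i % 2 ^ w * 2 ^ r.length = valLSB (r ++ natBits w i) from by
          rw [valLSB_append, valLSB_natBits, Nat.mul_comm],
        show r.length + w = (r ++ natBits w i).length from by
          rw [List.length_append, length_natBits]]
      exact emit_spec _ _
    rw [List.foldl_cons]
    rw [show emitBytes ((valLSB r, r.length, parts).1 + i % 2 ^ w * 2 ^ (valLSB r, r.length, parts).2.1)
          ((valLSB r, r.length, parts).2.1 + w) (valLSB r, r.length, parts).2.2
        = (valLSB (rem8 (r ++ natBits w i)), (rem8 (r ++ natBits w i)).length,
           parts ++ (full8 (r ++ natBits w i)).map (fun b => fmtHex 2 ((b : Nat) : Int))) from hstep]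
    rw [ih _ _ (rem8_length_lt _)]
    rw [show r ++ List.flatMap (natBits w) (i :: I') = (r ++ natBits w i) ++ List.flatMap (natBits w) I' from by
      rw [List.flatMap_cons, List.append_assoc]]
    rw [full8_append (r ++ natBits w i), rem8_append (r ++ natBits w i)]
    simp [List.map_append, List.append_assoc]

theorem rangeChunks (q : Nat) (L : List Bool) (img : List Char) (hq : q = (L.length + 7) / 8) :
    (List.range q).foldl
      (fun s k => s ++ fmtHex 2 ((valLSB ((L.drop (8 * k)).take 8) : Nat) : Int)) img
    = img ++ ((packA L).map (fun b => fmtHex 2 ((b : Nat) : Int))).flatten := by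
  induction q generalizing L img with
  | zero =>
    have : L = [] := by rw [← List.length_eq_zero_iff]; omega
    subst this
    rw [show packA ([] : List Bool) = [] from by rw [packA]; rfl]
    simp
  | succ q ih =>
    have hL : L ≠ [] := by
      intro hnil
      subst hnil
      simp at hq
    rw [List.range_succ_eq_map, List.foldl_cons, List.foldl_map]
    have hfun : (fun (s : List Char) k => s ++ fmtHex 2 ((valLSB ((L.drop (8 * k.succ)).take 8) : Nat) : Int))
        = (fun (s : List Char) k => s ++ fmtHex 2 ((valLSB (((L.drop 8).drop (8 * k)).take 8) : Nat) : Int)) := by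
      funext s k
      rw [List.drop_drop, show 8 + 8 * k = 8 * k.succ from by omega]
    rw [hfun, ih (L.drop 8) _ (by simp; omega)]
    rw [show packA L = valLSB (L.take 8) :: packA (L.drop 8) from by
      rw [packA, if_neg (by simp [hL])]]
    simp

theorem loopA (L : List Bool) (img : List Char) :
    (PySem.List.pyRange (-1) (((L.map bitChar).length : Int) - 1) 8).foldl
      (fun s i =>
        if i = -1 then
          s ++ fmtHex 2 ((parseBin (((L.map bitChar).take 8).reverse) : Nat) : Int)
        else
          s ++ fmtHex 2 ((parseBin ((((L.map bitChar).drop (i + 1).toNat).take 8).reverse) : Nat) : Int))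
      img
    = img ++ ((packA L).map (fun b => fmtHex 2 ((b : Nat) : Int))).flatten := by
  have hF : (fun (s : List Char) (i : Int) =>
        if i = -1 then
          s ++ fmtHex 2 ((parseBin (((L.map bitChar).take 8).reverse) : Nat) : Int)
        else
          s ++ fmtHex 2 ((parseBin ((((L.map bitChar).drop (i + 1).toNat).take 8).reverse) : Nat) : Int))
      = (fun (s : List Char) (i : Int) =>
          s ++ fmtHex 2 ((valLSB ((L.drop (i + 1).toNat).take 8) : Nat) : Int)) := by
    funext s i
    by_cases hi : i = -1
    · subst hi
      rw [if_pos rfl]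
      norm_num
      rw [← List.map_take, parseBin_reverse]
    · rw [if_neg hi, ← List.map_drop, ← List.map_take, parseBin_reverse]
  rw [hF]
  rw [PySem.List.pyRange_of_pos (-1) _ (by norm_num : (0:Int) < 8)]
  rw [List.foldl_map]
  have hq : (if (-1:Int) < ((L.map bitChar).length : Int) - 1
      then ((((L.map bitChar).length : Int) - 1 - (-1) + 8 - 1) / 8).toNat else 0)
      = (L.length + 7) / 8 := by
    rw [List.length_map]
    split <;> omega
  rw [hq]
  have hfun2 : (fun (x : List Char) (y : Nat) =>
        x ++ fmtHex 2 ((valLSB ((L.drop ((-1 : Int) + 8 * (y:Int) + 1).toNat).take 8) : Nat) : Int))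
      = (fun (s : List Char) (k : Nat) =>
          s ++ fmtHex 2 ((valLSB ((L.drop (8 * k)).take 8) : Nat) : Int)) := by
    funext s k
    rw [show ((-1 : Int) + 8 * (k:Int) + 1).toNat = 8 * k from by omega]
  rw [hfun2]
  exact rangeChunks _ L img rfl

theorem fold1_eq (xs : List Int) :
    xs.foldl
      (fun (p : PySem.Dict Int Nat × List Nat) colour =>
        let d := if p.1.contains colour then p.1 else p.1.insert colour p.1.size
        (d, p.2 ++ [d.getD colour 0]))
      (PySem.Dict.empty, [])
    = xs.foldl
      (fun (p : PySem.Dict Int Nat × List Nat) c =>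
        (p.1.setdefault c p.1.size, p.2 ++ [(p.1.get? c).getD p.1.size]))
      (PySem.Dict.empty, []) := by
  apply PySem.List.foldl_congr_mem
  intro p c _
  cases h : p.1.contains c with
  | true =>
    simp only [if_true]
    rw [PySem.Dict.setdefault_of_contains _ _ h]
    have hs : (p.1.get? c).isSome := by
      rw [← PySem.Dict.contains_eq_isSome_get?]
      exact h
    obtain ⟨v, hv⟩ := Option.isSome_iff_exists.mp hs
    rw [PySem.Dict.getD_eq_get?_getD, hv]
    simp
  | false =>
    simp only [Bool.false_eq_true, if_false]
    rw [PySem.Dict.setdefault_of_not_contains _ _ h]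
    have hnone : p.1.get? c = none := (PySem.Dict.get?_eq_none_iff_contains _ _).mpr h
    rw [PySem.Dict.getD_insert_self, hnone]
    simp

-- the palette's keys are exactly the distinct colours in first-occurrence order
theorem keys_fold (xs : List Int) (d : PySem.Dict Int Nat) (acc : List Nat) :
    (xs.foldl
      (fun (p : PySem.Dict Int Nat × List Nat) c =>
        (p.1.setdefault c p.1.size, p.2 ++ [(p.1.get? c).getD p.1.size]))
      (d, acc)).1.keys = PySem.Set.update d.keys xs := by
  induction xs generalizing d acc with
  | nil => simp [PySem.Set.update]
  | cons c l ih =>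
    rw [List.foldl_cons, ih]
    have hkeys : (d.setdefault c d.size).keys = PySem.Set.add d.keys c := by
      cases h : d.contains c with
      | true =>
        rw [PySem.Dict.setdefault_of_contains _ _ h]
        have hm : c ∈ d.keys := (PySem.Dict.contains_iff_mem_keys _ _).mp h
        simp [PySem.Set.add, PySem.Set.contains, hm]
      | false =>
        rw [PySem.Dict.setdefault_of_not_contains _ _ h]
        have hm : c ∉ d.keys := by
          intro hm
          rw [(PySem.Dict.contains_iff_mem_keys _ _).mpr hm] at h
          simp at h
        rw [PySem.Dict.keys_insert_of_not_contains]
        · simp [PySem.Set.add, PySem.Set.contains, hm]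
        · exact h
    rw [show PySem.Set.update d.keys (c :: l) = PySem.Set.update (PySem.Set.add d.keys c) l from rfl,
        hkeys]

-- ===== VERDICT (by name: the statement is the Claim_ definition above) =====
theorem encode_colours_spec : Claim_equal_encode_colours := by
  intro xs _ hpre
  obtain ⟨-, hcard⟩ := hpre
  show encode_colours xs = encode_colours_alt xs
  unfold encode_colours encode_colours_alt
  simp only []
  rw [fold1_eq]
  have hkeys := keys_fold xs PySem.Dict.empty []
  generalize hP : (xs.foldl
      (fun (p : PySem.Dict Int Nat × List Nat) c =>
        (p.1.setdefault c p.1.size, p.2 ++ [(p.1.get? c).getD p.1.size]))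
      (PySem.Dict.empty, [])) = P at hkeys ⊢
  obtain ⟨pal, I⟩ := P
  simp only []
  -- under Pre_ the palette has at most 256 entries, so bits_needed ≤ 8
  have hsize : pal.size ≤ 256 := by
    have hlen : pal.keys.length = pal.size := by
      simp [PySem.Dict.keys, PySem.Dict.size]
    rw [← hlen, hkeys]
    have : PySem.Set.update (PySem.Dict.empty (κ := Int) (ν := Nat)).keys xs
        = PySem.List.dedup xs := by
      simp [PySem.List.dedup_eq_ofList, PySem.Set.ofList_eq_foldl, PySem.Set.update,
        PySem.Dict.keys_empty]
    rw [this]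
    exact hcard
  have hw : (if pyCeilLog2 pal.size = 0 then 1 else pyCeilLog2 pal.size) ≤ 8 := by
    unfold pyCeilLog2
    by_cases h1 : pal.size ≤ 1
    · simp [h1]
    · rw [if_neg h1]
      have hlog : Nat.log2 (pal.size - 1) < 8 := by
        rw [Nat.log2_lt (by omega)]
        norm_num
        omega
      split <;> omega
  generalize hw0 : (if pyCeilLog2 (PySem.Dict.size pal) = 0 then 1 else pyCeilLog2 (PySem.Dict.size pal)) = w at hw
  -- A's header fold and c_data fold become flatMaps
  rw [PySem.List.foldl_append_eq_flatMap (fun colour => fmtHex 6 colour) pal.keys]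
  rw [PySem.List.foldl_append_eq_flatMap (fun i => ((zfill 8 (binDigits i)).reverse.take w)) I]
  rw [List.nil_append]
  rw [show (fun i => ((zfill 8 (binDigits i)).reverse.take w))
        = (fun i => (natBits w i).map bitChar) from funext (fun i => chunkChars w i hw)]
  rw [← List.map_flatMap]
  rw [loopA]
  -- B's accumulator fold
  have hB := foldB_spec w I [] (fmtHex 2 ((PySem.Dict.size pal % 256 : Nat) : Int)
      :: pal.keys.map (fun c => fmtHex 6 c)) (by simp)
  rw [show valLSB [] = 0 from rfl, show (([] : List Bool)).length = 0 from rfl,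
      List.nil_append] at hB
  rw [hB]
  simp only []
  generalize List.flatMap (natBits w) I = bits
  rw [packA_eq]
  by_cases hrem : rem8 bits = []
  · simp [hrem, List.flatMap_def, List.append_assoc]
  · have h0 : (rem8 bits).length ≠ 0 := by
      simpa [List.length_eq_zero_iff] using hrem
    simp [hrem, h0, List.flatMap_def, List.append_assoc]
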